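-- pv_equiv track=rewrite | github.com/MLNdlovu/VOICE-ASSISSTANT-CALENDAR | src/accessibility.py | _is_correction_signal
-- ===== SOURCE A (Python) =====
-- def _is_correction_signal(text: str) -> bool:
--     """Detect if user is correcting something."""
--     correction_keywords = [
--         'wait', 'no', 'actually', 'scratch that', 'i mean',
--         'sorry', 'let me rephrase', 'i meant', 'change that',
--         'make it', 'instead', 'oops', 'hold on', 'wait no'
--     ]
--
--     text_lower = text.lower()
--     return any(keyword in text_lower for keyword in correction_keywords)
-- ===== SOURCE B (Python) =====
-- def _is_correction_signal(text: str) -> bool: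
--     """Detect if user is correcting something (single left-to-right position scan)."""
--     keywords = (
--         'wait', 'no', 'actually', 'scratch that', 'i mean',
--         'sorry', 'let me rephrase', 'i meant', 'change that',
--         'make it', 'instead', 'oops', 'hold on', 'wait no'
--     )
--     t = text.lower()
--     return any(t.startswith(k, i) for i in range(len(t) + 1) for k in keywords)
-- ===== Notes on version B (the rewrite author's own statement) =====
-- stated objective: alternative
-- what changed: B replaces A's per-keyword substring-containment loop by a single left-to-right scan over text positions, testing at each position whether any keyword starts there with a prefix check.
import Mathlib
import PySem

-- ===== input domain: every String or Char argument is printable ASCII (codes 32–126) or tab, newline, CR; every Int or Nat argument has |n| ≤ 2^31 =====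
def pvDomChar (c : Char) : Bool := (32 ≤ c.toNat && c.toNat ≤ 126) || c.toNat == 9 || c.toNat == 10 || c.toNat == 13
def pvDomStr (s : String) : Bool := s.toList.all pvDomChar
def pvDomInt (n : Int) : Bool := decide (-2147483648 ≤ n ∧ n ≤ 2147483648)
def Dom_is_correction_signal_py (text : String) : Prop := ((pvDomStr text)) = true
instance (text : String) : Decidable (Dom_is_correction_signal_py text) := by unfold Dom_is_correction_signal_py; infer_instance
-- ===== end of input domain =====

-- B replaces A's per-keyword substring-containment loop by a single left-to-right
-- scan over text positions, testing at each position whether any keyword starts there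
-- (objective: alternative; same cost).

-- ===== PORT A =====
def is_correction_signal_py (text : String) : Bool :=
  let correction_keywords : List String :=
    ["wait", "no", "actually", "scratch that", "i mean",
     "sorry", "let me rephrase", "i meant", "change that",
     "make it", "instead", "oops", "hold on", "wait no"]
  let text_lower := PySem.Str.lower text
  correction_keywords.any (fun keyword => PySem.Str.isIn keyword text_lower)

-- ===== PORT B =====
def altKeywords : List String :=
  ["wait", "no", "actually", "scratch that", "i mean",
   "sorry", "let me rephrase", "i meant", "change that",
   "make it", "instead", "oops", "hold on", "wait no"]

def is_correction_signal_py_alt (text : String) : Bool :=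
  let t := (PySem.Str.lower text).toList
  (List.range (t.length + 1)).any (fun i =>
    altKeywords.any (fun k => PySem.Chars.startswith (t.drop i) k.toList))

-- ===== PRECONDITION & SPEC =====
def Spec_is_correction_signal_py (text : String) (out : Bool) : Prop := out = is_correction_signal_py_alt text
instance (text : String) (out : Bool) : Decidable (Spec_is_correction_signal_py text out) := by unfold Spec_is_correction_signal_py; infer_instance

-- ===== CLAIM (what is proved, stated in full; the proofs are below) =====
def Claim_equal_is_correction_signal_py : Prop := ∀ (text : String), Dom_is_correction_signal_py text → Spec_is_correction_signal_py text (is_correction_signal_py text)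

-- ===== LEMMAS AND PROOFS =====

-- substring containment = some position in 0..len admits the keyword as a prefix
theorem isIn_eq_any_range (k t : List Char) :
    PySem.Chars.isIn k t =
      (List.range (t.length + 1)).any (fun i => PySem.Chars.startswith (t.drop i) k) := by
  rcases h : PySem.Chars.isIn k t with _ | _
  · symm
    rw [List.any_eq_false]
    intro i _ hsw
    rw [PySem.Chars.startswith_iff] at hsw
    have : ∃ j, k <+: t.drop j := ⟨i, hsw⟩
    rw [PySem.Chars.exists_prefix_drop_iff_isIn] at this
    simp [h] at this
  · symm
    rw [List.any_eq_true]
    have := (PySem.Chars.exists_prefix_drop_iff_isIn (sub := k) (s := t)).mpr h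
    obtain ⟨j, hj⟩ := this
    by_cases hle : j ≤ t.length
    · exact ⟨j, by simp [List.mem_range]; omega, by rw [PySem.Chars.startswith_iff]; exact hj⟩
    · refine ⟨t.length, by simp, ?_⟩
      rw [PySem.Chars.startswith_iff]
      have h1 : t.drop j = [] := List.drop_eq_nil_of_le (by omega)
      have h2 : t.drop t.length = [] := List.drop_eq_nil_of_le le_rfl
      rw [h2, ← h1]; exact hj

-- ===== VERDICT (by name: the statement is the Claim_ definition above) =====
theorem is_correction_signal_py_spec : Claim_equal_is_correction_signal_py := by
  intro text _
  unfold Spec_is_correction_signal_py is_correction_signal_py is_correction_signal_py_alt altKeywords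
  simp only [PySem.Str.isIn_eq, isIn_eq_any_range]
  set t := (PySem.Str.lower text).toList
  apply Bool.eq_iff_iff.mpr
  simp only [List.any_eq_true]
  constructor
  · rintro ⟨k, hk, i, hi, hsw⟩; exact ⟨i, hi, k, hk, hsw⟩
  · rintro ⟨i, hi, k, hk, hsw⟩; exact ⟨k, hk, i, hi, hsw⟩
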